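-- pv_equiv track=rewrite | github.com/DSA-Prowess/DSA | AMAZON/baby_block.py | can_spell_word
-- ===== SOURCE A (Python) =====
-- def can_spell_word(blocks, target_word):
--     """
--     Determine if a target word can be spelled using a collection of letter blocks.
--
--     Args:
--         blocks: List of tuples, where each tuple contains the letters on a block
--         target_word: The word we're trying to spell
--
--     Returns:
--         Boolean indicating whether the word can be spelled
--     """
--     # Create a copy of blocks we can modify
--     #Since we are popping available block by default it is a stack ??
--     available_blocks = blocks.copy()
--
--     # Try to spell each letter in the target word
--     for letter in target_word:
--         found_block = False
--
--         # Look through available blocks for this letter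
--         for i, block in enumerate(available_blocks):
--             if letter in block:
--                 # Found a block with this letter, remove it from available blocks
--                 found_block = True
--                 available_blocks.pop(i)
--                 break
--
--         # If we couldn't find a block with this letter, return False
--         if not found_block:
--             return False
--
--     # If we made it through all letters, return True
--     return True
-- ===== SOURCE B (Python) =====
-- def can_spell_word(blocks, target_word):
--     # Index the blocks once: for each letter, the ascending list of block
--     # indices whose block contains it; spell the word by taking, per letter,
--     # the first not-yet-used index of that letter's list, advancing a
--     # per-letter cursor past used entries (lazy deletion), never rescanning.
--     positions = {}
--     for i, block in enumerate(blocks):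
--         for ch in dict.fromkeys(block):
--             positions.setdefault(ch, []).append(i)
--     used = set()
--     cursor = {}
--     for letter in target_word:
--         lst = positions.get(letter, ())
--         k = cursor.get(letter, 0)
--         while k < len(lst) and lst[k] in used:
--             k += 1
--         cursor[letter] = k + 1
--         if k == len(lst):
--             return False
--         used.add(lst[k])
--     return True
-- ===== Notes on version B (the rewrite author's own statement) =====
-- stated objective: faster
-- what changed: A rescans the shrinking block list for every letter; B indexes the blocks once into per-letter ascending index lists and spells the word by advancing a per-letter cursor past used indices (lazy deletion), so no inner scan over blocks remains.
import Mathlib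
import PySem

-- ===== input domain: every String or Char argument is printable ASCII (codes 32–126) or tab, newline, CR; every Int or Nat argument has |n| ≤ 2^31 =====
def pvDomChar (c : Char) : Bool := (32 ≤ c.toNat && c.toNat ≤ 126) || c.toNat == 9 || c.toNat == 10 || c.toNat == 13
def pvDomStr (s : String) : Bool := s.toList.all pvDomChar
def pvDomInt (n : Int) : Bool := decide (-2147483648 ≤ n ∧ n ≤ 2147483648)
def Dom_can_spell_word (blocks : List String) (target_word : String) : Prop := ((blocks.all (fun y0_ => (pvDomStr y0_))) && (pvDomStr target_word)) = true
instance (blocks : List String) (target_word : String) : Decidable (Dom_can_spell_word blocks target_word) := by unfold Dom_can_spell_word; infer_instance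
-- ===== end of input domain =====

-- B indexes the blocks once into per-letter ascending index lists and spells with per-letter
-- lazy-deletion cursors, removing A's inner scan over the block list (objective: faster).


-- ===== PORT A =====
-- inner 'for i, block in enumerate(available_blocks): if letter in block: ... pop(i); break':
-- remove the first block containing the letter (none = found_block stayed False)
def pvPopFirst (c : Char) : List String → Option (List String)
  | [] => none
  | b :: bs =>
    if PySem.Chars.isIn [c] b.toList then some bs
    else (pvPopFirst c bs).map (fun r => b :: r)

-- outer 'for letter in target_word' loop threading available_blocks
def pvSpellLoopA : List Char → List String → Bool
  | [], _ => true
  | c :: cs, avail =>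
    match pvPopFirst c avail with
    | none => false
    | some avail' => pvSpellLoopA cs avail'

def can_spell_word (blocks : List String) (target_word : String) : Bool :=
  pvSpellLoopA target_word.toList blocks

-- ===== PORT B =====
-- 'for i, block in enumerate(blocks): for ch in dict.fromkeys(block): positions.setdefault(ch, []).append(i)'
def pvPositions (blocks : List String) : PySem.Dict Char (List Int) :=
  (PySem.List.enumerate blocks 0).foldl
    (fun d p => (PySem.List.dedup p.2.toList).foldl (fun d ch => d.modify ch [] (fun l => l ++ [p.1])) d)
    PySem.Dict.empty

-- 'while k < len(lst) and lst[k] in used: k += 1'  (k is a nonnegative Python int, kept as Nat)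
def pvSkip (lst : List Int) (used : PySem.Set Int) (k : Nat) : Nat :=
  if h : k < lst.length then
    if used.contains lst[k] then pvSkip lst used (k + 1) else k
  else k
termination_by lst.length - k

-- 'for letter in target_word' loop threading used and cursor
def pvSpellLoopB (pos : PySem.Dict Char (List Int)) :
    List Char → PySem.Set Int → PySem.Dict Char Nat → Bool
  | [], _, _ => true
  | c :: cs, used, cursor =>
    let lst := pos.getD c []
    let k := pvSkip lst used (cursor.getD c 0)
    let cursor' := cursor.insert c (k + 1)
    if h : k < lst.length then
      pvSpellLoopB pos cs (used.add lst[k]) cursor'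
    else false

def can_spell_word_alt (blocks : List String) (target_word : String) : Bool :=
  pvSpellLoopB (pvPositions blocks) target_word.toList PySem.Set.empty PySem.Dict.empty

-- ===== PRECONDITION & SPEC =====
def Spec_can_spell_word (blocks : List String) (target_word : String) (out : Bool) : Prop := out = can_spell_word_alt blocks target_word
instance (blocks : List String) (target_word : String) (out : Bool) : Decidable (Spec_can_spell_word blocks target_word out) := by unfold Spec_can_spell_word; infer_instance

-- ===== CLAIM (what is proved, stated in full; the proofs are below) =====
def Claim_equal_can_spell_word : Prop := ∀ (blocks : List String) (target_word : String), Dom_can_spell_word blocks target_word → Spec_can_spell_word blocks target_word (can_spell_word blocks target_word)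

-- ===== LEMMAS AND PROOFS =====

-- ascending list of indices of blocks containing c (the content of pvPositions at c)
def pvIdx (c : Char) (blocks : List String) : List Int :=
  ((PySem.List.enumerate blocks 0).filter (fun p => p.2.toList.contains c)).map (fun p => p.1)

-- 'letter in block' on a one-char needle is list membership
theorem pv_isIn_singleton (c : Char) (s : List Char) : PySem.Chars.isIn [c] s = s.contains c := by
  by_cases h : c ∈ s
  · simp [(PySem.Chars.isIn_iff_infix [c] s).2 ((List.singleton_infix_iff c s).2 h), h]
  · simp [(PySem.Chars.isIn_eq_false_iff [c] s).2 (fun hf => h ((List.singleton_infix_iff c s).1 hf)), h]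

theorem pv_contains_add_self (s : PySem.Set Int) (x : Int) : (PySem.Set.add s x).contains x = true := by
  simp [PySem.Set.mem_add]

theorem pv_contains_add_of_contains (s : PySem.Set Int) (x y : Int) (h : s.contains y = true) : (PySem.Set.add s x).contains y = true := by
  rw [PySem.Set.contains_iff] at *
  exact (PySem.Set.mem_add s x y).2 (Or.inl h)

theorem pv_contains_add_of_ne (s : PySem.Set Int) (x y : Int) (h : y ≠ x) : (PySem.Set.add s x).contains y = s.contains y := by
  by_cases hy : y ∈ s
  · simp [PySem.Set.mem_add, hy]
  · have h1 : (PySem.Set.add s x).contains y = false := by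
      rw [Bool.eq_false_iff]
      intro hc
      rcases (PySem.Set.mem_add s x y).1 ((PySem.Set.contains_iff _ _).1 hc) with h2 | h2
      · exact hy h2
      · exact h h2
    have h2 : s.contains y = false := by
      rw [Bool.eq_false_iff]; intro hc; exact hy ((PySem.Set.contains_iff _ _).1 hc)
    rw [h1, h2]

theorem pv_dedup_filter (cs : List Char) (c : Char) :
    (PySem.List.dedup cs).filter (fun ch => ch == c) = if cs.contains c then [c] else [] := by
  rw [List.filter_beq]
  by_cases h : c ∈ cs
  · rw [List.count_eq_one_of_mem (PySem.List.nodup_dedup cs) (by simpa [PySem.List.mem_dedup] using h)]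
    simp [h, List.replicate]
  · rw [List.count_eq_zero_of_not_mem (by simpa [PySem.List.mem_dedup] using h)]
    simp [h]

theorem pv_build_one (d : PySem.Dict Char (List Int)) (i : Int) (cs : List Char) (c : Char) :
    ((PySem.List.dedup cs).foldl (fun d ch => d.modify ch [] (fun l => l ++ [i])) d).getD c []
      = d.getD c [] ++ (if cs.contains c then [i] else []) := by
  have h1 : ((PySem.List.dedup cs).foldl (fun d ch => d.modify ch [] (fun l => l ++ [i])) d)
      = (((PySem.List.dedup cs).map (fun ch => (ch, i))).foldl
          (fun d q => d.modify q.1 [] (fun l => l ++ [q.2])) d) := by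
    rw [List.foldl_map]
  rw [h1, PySem.Dict.getD_foldl_modify_append]
  rw [List.filter_map]
  have h2 : ((fun p => p.1 == c) ∘ (fun ch => (ch, i))) = (fun ch => ch == c) := rfl
  rw [h2, pv_dedup_filter]
  by_cases h : c ∈ cs <;> simp [h]

theorem pv_build (l : List (Int × String)) (d : PySem.Dict Char (List Int)) (c : Char) :
    (l.foldl (fun d p => (PySem.List.dedup p.2.toList).foldl
        (fun d ch => d.modify ch [] (fun l => l ++ [p.1])) d) d).getD c []
      = d.getD c [] ++ (l.filter (fun p => p.2.toList.contains c)).map (fun p => p.1) := by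
  induction l generalizing d with
  | nil => simp
  | cons a l ih =>
    rw [List.foldl_cons, ih, pv_build_one]
    by_cases h : c ∈ a.2.toList <;> simp [h]

theorem pv_positions_getD (blocks : List String) (c : Char) :
    (pvPositions blocks).getD c [] = pvIdx c blocks := by
  rw [pvPositions, pv_build, pvIdx]
  simp [PySem.Dict.getD, PySem.Dict.empty, PySem.Dict.get?]

theorem pv_pvSkip_mem (lst : List Int) (used : PySem.Set Int) (k j : Nat)
    (h1 : k ≤ j) (h2 : j < pvSkip lst used k) (h : j < lst.length) :
    used.contains lst[j] = true := by
  fun_induction pvSkip lst used k with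
  | case1 k hk hc ih =>
    rcases Nat.eq_or_lt_of_le h1 with rfl | hlt
    · exact hc
    · exact ih hlt h2
  | case2 k hk hc => omega
  | case3 k hk => omega

theorem pv_pvSkip_not_mem (lst : List Int) (used : PySem.Set Int) (k : Nat)
    (h : pvSkip lst used k < lst.length) :
    used.contains lst[pvSkip lst used k] = false := by
  fun_induction pvSkip lst used k with
  | case1 k hk hc ih => exact ih h
  | case2 k hk hc => simpa using hc
  | case3 k hk => omega

theorem pv_find?_eq (lst : List Int) (p : Int → Bool) (k : Nat)
    (hbef : ∀ j (h : j < lst.length), j < k → p lst[j] = false)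
    (hat : ∀ (h : k < lst.length), p lst[k] = true) :
    lst.find? p = if h : k < lst.length then some lst[k] else none := by
  induction lst generalizing k with
  | nil => simp
  | cons a l ih =>
    cases k with
    | zero =>
      have := hat (by simp)
      simp at this
      simp [List.find?, this]
    | succ k =>
      have h0 : p a = false := by simpa using hbef 0 (by simp) (by omega)
      rw [List.find?_cons_of_neg (by simp [h0])]
      rw [ih k (fun j hj hjk => by simpa using hbef (j+1) (by simpa using hj) (by omega))
            (fun h => by simpa using hat (by simpa using h))]
      by_cases h : k < l.length <;> simp [h]

theorem pv_step (c : Char) (l : List (Int × String)) (used : PySem.Set Int)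
    (hnd : (l.map Prod.fst).Nodup) :
    pvPopFirst c ((l.filter (fun p => !(used.contains p.1))).map (fun p => p.2)) =
      (((l.filter (fun p => p.2.toList.contains c)).map (fun p => p.1)).find?
          (fun i => !(used.contains i))).map
        (fun i => (l.filter (fun p => !((PySem.Set.add used i).contains p.1))).map (fun p => p.2)) := by
  induction l with
  | nil => simp [pvPopFirst]
  | cons a l ih =>
    rw [List.map_cons, List.nodup_cons] at hnd
    obtain ⟨hal, hnd'⟩ := hnd
    by_cases hu : used.contains a.1
    · -- a's index already used: a is dropped from the available list
      have hu' : a.1 ∈ used := (PySem.Set.contains_iff _ _).1 hu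
      rw [List.filter_cons_of_neg (by simp [hu']), ih hnd']
      have hcand : ((((a :: l).filter (fun p => p.2.toList.contains c)).map (fun p => p.1)).find?
            (fun i => !(used.contains i)))
          = (((l.filter (fun p => p.2.toList.contains c)).map (fun p => p.1)).find?
              (fun i => !(used.contains i))) := by
        by_cases hb : a.2.toList.contains c
        · rw [List.filter_cons_of_pos (p := fun p : Int × String => p.2.toList.contains c) hb, List.map_cons,
              List.find?_cons_of_neg (by simp [hu'])]
        · rw [List.filter_cons_of_neg (p := fun p : Int × String => p.2.toList.contains c) (by simpa using hb)]
      rw [hcand]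
      cases hf : ((l.filter (fun p => p.2.toList.contains c)).map (fun p => p.1)).find?
          (fun i => !(used.contains i)) with
      | none => rfl
      | some i =>
        simp only [Option.map_some]
        congr 1
        have : (PySem.Set.add used i).contains a.1 = true :=
          pv_contains_add_of_contains used i a.1 hu
        rw [List.filter_cons_of_neg (by simp [(PySem.Set.contains_iff _ _).1 this])]
    · have hu' : a.1 ∉ used := fun hm => hu ((PySem.Set.contains_iff _ _).2 hm)
      by_cases hb : a.2.toList.contains c
      · -- a is available and contains c: A pops a, B takes index a.1
        rw [List.filter_cons_of_pos (by simp [hu']), List.map_cons]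
        rw [List.filter_cons_of_pos (p := fun p : Int × String => p.2.toList.contains c) hb, List.map_cons,
            List.find?_cons_of_pos (by simp [hu'])]
        simp only [pvPopFirst, pv_isIn_singleton, hb, if_pos]
        simp only [Option.map_some]
        have hself : (PySem.Set.add used a.1).contains a.1 = true :=
          pv_contains_add_self used a.1
        rw [List.filter_cons_of_neg (by simp [(PySem.Set.contains_iff _ _).1 hself])]
        have hcongr : ∀ p ∈ l, (!((PySem.Set.add used a.1).contains p.1))
            = (!(used.contains p.1)) := by
          intro p hp
          have hne : p.1 ≠ a.1 := fun he => hal (he ▸ List.mem_map_of_mem hp)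
          rw [pv_contains_add_of_ne used a.1 p.1 hne]
        rw [List.filter_congr hcongr]
      · -- a is available but lacks c: A keeps a in front and recurses
        rw [List.filter_cons_of_pos (by simp [hu']), List.map_cons]
        rw [List.filter_cons_of_neg (p := fun p : Int × String => p.2.toList.contains c) (by simpa using hb)]
        simp only [pvPopFirst, pv_isIn_singleton, hb, if_neg, Bool.false_eq_true,
          not_false_iff]
        rw [ih hnd']
        cases hf : ((l.filter (fun p => p.2.toList.contains c)).map (fun p => p.1)).find?
            (fun i => !(used.contains i)) with
        | none => rfl
        | some i =>
          have hmem : i ∈ l.map Prod.fst := by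
            have h1 := List.mem_of_find?_eq_some hf
            obtain ⟨p, hp, rfl⟩ := List.mem_map.mp h1
            exact List.mem_map_of_mem (List.mem_of_mem_filter hp)
          have hne : a.1 ≠ i := fun he => hal (he ▸ hmem)
          simp only [Option.map_some]
          rw [List.filter_cons_of_pos (by
            rw [pv_contains_add_of_ne used i a.1 hne]; simp [hu']), List.map_cons]

theorem pv_enum_nodup (blocks : List String) :
    ((PySem.List.enumerate blocks 0).map Prod.fst).Nodup := by
  have h := PySem.List.pairwise_lt_enumerate blocks 0
  exact (List.pairwise_map.2 h).imp (fun h => ne_of_lt h)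

theorem pv_loop (blocks : List String) (cs : List Char) (used : PySem.Set Int)
    (cursor : PySem.Dict Char Nat)
    (hinv : ∀ (c : Char) (j : Nat), j < cursor.getD c 0 →
      ∀ (h : j < (pvIdx c blocks).length), used.contains ((pvIdx c blocks)[j]) = true) :
    pvSpellLoopA cs (((PySem.List.enumerate blocks 0).filter
        (fun p => !(used.contains p.1))).map (fun p => p.2))
      = pvSpellLoopB (pvPositions blocks) cs used cursor := by
  induction cs generalizing used cursor with
  | nil => rfl
  | cons c cs ih =>
    have hfind : (pvIdx c blocks).find? (fun i => !(used.contains i))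
        = if h : pvSkip (pvIdx c blocks) used (cursor.getD c 0) < (pvIdx c blocks).length
          then some ((pvIdx c blocks)[pvSkip (pvIdx c blocks) used (cursor.getD c 0)]'(by omega))
          else none := by
      apply pv_find?_eq
      · intro j hj hjk
        by_cases hj0 : j < cursor.getD c 0
        · simp only [hinv c j hj0 hj, Bool.not_true]
        · simp only [pv_pvSkip_mem (pvIdx c blocks) used (cursor.getD c 0) j (by omega) hjk hj,
            Bool.not_true]
      · intro h
        simp only [pv_pvSkip_not_mem (pvIdx c blocks) used (cursor.getD c 0) h, Bool.not_false]
    have hB : pvSpellLoopB (pvPositions blocks) (c :: cs) used cursor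
        = if h : pvSkip (pvIdx c blocks) used (cursor.getD c 0) < (pvIdx c blocks).length
          then pvSpellLoopB (pvPositions blocks) cs
            (used.add ((pvIdx c blocks)[pvSkip (pvIdx c blocks) used (cursor.getD c 0)]'(by omega)))
            (cursor.insert c (pvSkip (pvIdx c blocks) used (cursor.getD c 0) + 1))
          else false := by
      simp only [pvSpellLoopB]
      rw [pv_positions_getD]
    rw [hB]
    simp only [pvSpellLoopA]
    rw [pv_step c (PySem.List.enumerate blocks 0) used (pv_enum_nodup blocks)]
    have hcand : (((PySem.List.enumerate blocks 0).filter
        (fun p => p.2.toList.contains c)).map (fun p => p.1)) = pvIdx c blocks := rfl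
    rw [hcand, hfind]
    by_cases h : pvSkip (pvIdx c blocks) used (cursor.getD c 0) < (pvIdx c blocks).length
    · rw [dif_pos h, dif_pos h]
      simp only [Option.map_some]
      apply ih
      intro c' j hj hlen
      by_cases hc : c' = c
      · subst hc
        rw [PySem.Dict.getD_insert_self] at hj
        rcases Nat.lt_succ_iff_lt_or_eq.mp hj with hlt | rfl
        · by_cases hj0 : j < cursor.getD c' 0
          · exact pv_contains_add_of_contains _ _ _ (hinv c' j hj0 hlen)
          · exact pv_contains_add_of_contains _ _ _
              (pv_pvSkip_mem (pvIdx c' blocks) used (cursor.getD c' 0) j (by omega) hlt hlen)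
        · exact pv_contains_add_self _ _
      · rw [PySem.Dict.getD_insert_of_ne _ _ _ hc] at hj
        exact pv_contains_add_of_contains _ _ _ (hinv c' j hj hlen)
    · rw [dif_neg h, dif_neg h]
      rfl

-- ===== VERDICT (by name: the statement is the Claim_ definition above) =====
theorem can_spell_word_spec : Claim_equal_can_spell_word := by
  intro blocks target_word _
  unfold Spec_can_spell_word can_spell_word can_spell_word_alt
  have h0 : (((PySem.List.enumerate blocks 0).filter
      (fun p => !((PySem.Set.empty : PySem.Set Int).contains p.1))).map (fun p => p.2)) = blocks := by
    simp [PySem.Set.empty, PySem.List.map_snd_enumerate]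
  conv_lhs => rw [← h0]
  exact pv_loop blocks target_word.toList PySem.Set.empty PySem.Dict.empty
    (fun c j hj h => by rw [PySem.Dict.getD_empty] at hj; omega)
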